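-- pv_equiv track=rewrite | github.com/serverscom/serverscom-ansible | ansible_collections/serverscom/sc_api/plugins/module_utils/api.py | classify_matching_keys
-- ===== SOURCE A (Python) =====
-- def classify_matching_keys(key_list, name, fingerprint):
--     full_match = []
--     partial_match = []
--     any_match = []
--     for key in key_list:
--         if key['name'] == name or key['fingerprint'] == fingerprint:
--             any_match.append(key)
--             if key['name'] == name and key['fingerprint'] == fingerprint:
--                 full_match.append(key)
--             else:
--                 partial_match.append(key)
--     return (full_match, partial_match, any_match)
-- ===== SOURCE B (Python) =====
-- def classify_matching_keys(key_list, name, fingerprint):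
--     # Tag each key once with its integer match count (0, 1 or 2), then
--     # select buckets by comparing the count: 2 = full, 1 = partial, >=1 = any.
--     tagged = [((key['name'] == name) + (key['fingerprint'] == fingerprint), key)
--               for key in key_list]
--     return ([key for t, key in tagged if t == 2],
--             [key for t, key in tagged if t == 1],
--             [key for t, key in tagged if t >= 1])
-- ===== Notes on version B (the rewrite author's own statement) =====
-- stated objective: alternative
-- what changed: Replaces A's single loop with interleaved OR/AND boolean tests and three appends by a tag-then-select scheme: each key is tagged once with an integer match count (0/1/2) and the three lists are selected by count thresholds (==2 full, ==1 partial, >=1 any), so each comparison is evaluated once per key and the boolean or/and logic disappears.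
import Mathlib
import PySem

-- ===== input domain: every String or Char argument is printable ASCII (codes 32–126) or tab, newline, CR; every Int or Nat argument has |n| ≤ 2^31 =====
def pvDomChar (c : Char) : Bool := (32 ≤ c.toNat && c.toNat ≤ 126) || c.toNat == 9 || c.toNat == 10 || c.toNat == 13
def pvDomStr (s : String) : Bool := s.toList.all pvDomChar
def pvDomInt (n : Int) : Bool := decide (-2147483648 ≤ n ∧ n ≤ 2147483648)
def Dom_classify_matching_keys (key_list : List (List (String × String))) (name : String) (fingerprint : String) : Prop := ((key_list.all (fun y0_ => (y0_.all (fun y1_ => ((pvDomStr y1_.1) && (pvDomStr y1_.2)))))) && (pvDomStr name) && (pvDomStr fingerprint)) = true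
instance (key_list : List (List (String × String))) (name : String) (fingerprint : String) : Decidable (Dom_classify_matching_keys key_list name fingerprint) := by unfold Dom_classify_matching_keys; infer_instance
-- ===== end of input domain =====

-- B replaces A's interleaved boolean-or/and three-accumulator loop by a tag-then-select
-- scheme: each key gets an integer match count once, buckets are picked by count thresholds.


-- ===== PORT A =====
-- key['name'] : first-match association-list lookup; Pre_ guarantees isSome, so getD "" is never used.
def pvLook (key : List (String × String)) (k : String) : String :=
  (List.lookup k key).getD ""

def classify_matching_keys (key_list : List (List (String × String))) (name : String) (fingerprint : String) : (List (List (String × String))) × (List (List (String × String))) × (List (List (String × String))) :=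
  let r := key_list.foldl
    (fun (acc : List (List (String × String)) × List (List (String × String)) × List (List (String × String))) key =>
      let (full_match, partial_match, any_match) := acc
      if pvLook key "name" == name || pvLook key "fingerprint" == fingerprint then
        if pvLook key "name" == name && pvLook key "fingerprint" == fingerprint then
          (full_match ++ [key], partial_match, any_match ++ [key])
        else
          (full_match, partial_match ++ [key], any_match ++ [key])
      else acc)
    ([], [], [])
  r

-- ===== PORT B =====
-- the integer match count of a key: (name matches) + (fingerprint matches) ∈ {0,1,2}
def pvTag (name fingerprint : String) (key : List (String × String)) : Nat × List (String × String) :=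
  ((if pvLook key "name" == name then 1 else 0) + (if pvLook key "fingerprint" == fingerprint then 1 else 0), key)

def classify_matching_keys_alt (key_list : List (List (String × String))) (name : String) (fingerprint : String) : (List (List (String × String))) × (List (List (String × String))) × (List (List (String × String))) :=
  let tagged := key_list.map (pvTag name fingerprint)
  ((tagged.filter (fun tk => tk.1 == 2)).map Prod.snd,
   (tagged.filter (fun tk => tk.1 == 1)).map Prod.snd,
   (tagged.filter (fun tk => decide (1 ≤ tk.1))).map Prod.snd)

-- ===== PRECONDITION & SPEC =====
-- A raises KeyError on any key dict missing 'name' or 'fingerprint'; Pre_ excludes exactly those.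
def Pre_classify_matching_keys (key_list : List (List (String × String))) (name : String) (fingerprint : String) : Prop :=
  (key_list.all (fun key => (List.lookup "name" key).isSome && (List.lookup "fingerprint" key).isSome)) = true
instance (key_list : List (List (String × String))) (name : String) (fingerprint : String) : Decidable (Pre_classify_matching_keys key_list name fingerprint) := by unfold Pre_classify_matching_keys; infer_instance

def pvWitness_classify_matching_keys : (List (List (String × String))) × String × String :=
  ([[("name", "a"), ("fingerprint", "x")], [("name", "b"), ("fingerprint", "y")]], "a", "y")

def Spec_classify_matching_keys (key_list : List (List (String × String))) (name : String) (fingerprint : String) (out : (List (List (String × String))) × (List (List (String × String))) × (List (List (String × String)))) : Prop := out = classify_matching_keys_alt key_list name fingerprint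
instance (key_list : List (List (String × String))) (name : String) (fingerprint : String) (out : (List (List (String × String))) × (List (List (String × String))) × (List (List (String × String)))) : Decidable (Spec_classify_matching_keys key_list name fingerprint out) := by unfold Spec_classify_matching_keys; infer_instance

-- ===== CLAIM (what is proved, stated in full; the proofs are below) =====
def Claim_equal_classify_matching_keys : Prop := ∀ (key_list : List (List (String × String))) (name : String) (fingerprint : String), Dom_classify_matching_keys key_list name fingerprint → Pre_classify_matching_keys key_list name fingerprint → Spec_classify_matching_keys key_list name fingerprint (classify_matching_keys key_list name fingerprint)
-- A's fold, with its accumulators made explicit, equals B's three tag-threshold selections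
theorem pv_fold_eq (name fingerprint : String) :
    ∀ (l : List (List (String × String)))
      (f p a : List (List (String × String))),
    l.foldl
      (fun (acc : List (List (String × String)) × List (List (String × String)) × List (List (String × String))) key =>
        let (full_match, partial_match, any_match) := acc
        if pvLook key "name" == name || pvLook key "fingerprint" == fingerprint then
          if pvLook key "name" == name && pvLook key "fingerprint" == fingerprint then
            (full_match ++ [key], partial_match, any_match ++ [key])
          else
            (full_match, partial_match ++ [key], any_match ++ [key])
        else acc)
      (f, p, a)
    = (f ++ ((l.map (pvTag name fingerprint)).filter (fun tk => tk.1 == 2)).map Prod.snd,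
       p ++ ((l.map (pvTag name fingerprint)).filter (fun tk => tk.1 == 1)).map Prod.snd,
       a ++ ((l.map (pvTag name fingerprint)).filter (fun tk => decide (1 ≤ tk.1))).map Prod.snd) := by
  intro l
  induction l with
  | nil => intro f p a; simp
  | cons k t ih =>
    intro f p a
    rw [List.foldl_cons, List.map_cons]
    cases hn : (pvLook k "name" == name) <;> cases hf : (pvLook k "fingerprint" == fingerprint) <;>
      simp only [hn, hf, pvTag, Bool.false_or, Bool.or_false, Bool.or_self,
        Bool.and_false, Bool.and_true, if_true, List.filter_cons] <;>
      rw [ih] <;> simp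

-- ===== VERDICT (by name: the statement is the Claim_ definition above) =====
theorem classify_matching_keys_spec : Claim_equal_classify_matching_keys := by
  intro key_list name fingerprint _ _
  show classify_matching_keys key_list name fingerprint = classify_matching_keys_alt key_list name fingerprint
  exact (pv_fold_eq name fingerprint key_list [] [] []).trans (by unfold classify_matching_keys_alt; simp only [List.nil_append])
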